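-- pv_equiv track=rewrite | github.com/lrnq/ibbsc | ibbsc/plot_utils.py | bucket_data_for_plots
-- ===== SOURCE A (Python) =====
-- def bucket_data_for_plots(max_act_values):
--     biggest = {}
--     smallest = {}
--
--     sorted_max_vals = sorted(max_act_values)
--     N = len(sorted_max_vals)
--     for i in range(N):
--         value = sorted_max_vals[i]
--         index = max_act_values.index(value)
--         if i < N//2:
--             smallest[index] = value
--         else:
--             biggest[index] = value
--
--     return biggest, smallest
-- ===== SOURCE B (Python) =====
-- def bucket_data_for_plots(max_act_values):
--     # Run-length approach: one pass records (first_index, count) per distinct value;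
--     # sort only the distinct values and split whole runs by cumulative count vs N//2.
--     info = {}
--     for i, v in enumerate(max_act_values):
--         if v in info:
--             info[v] = (info[v][0], info[v][1] + 1)
--         else:
--             info[v] = (i, 1)
--     h = len(max_act_values) // 2
--     biggest = {}
--     smallest = {}
--     seen = 0
--     for v in sorted(info):
--         first, cnt = info[v]
--         if seen < h:
--             smallest[first] = v
--         if seen + cnt > h:
--             biggest[first] = v
--         seen += cnt
--     return biggest, smallest
-- ===== Notes on version B (the rewrite author's own statement) =====
-- stated objective: faster
-- what changed: B switches to a run-length representation: one pass stores (first_index, count) per distinct value, then sorts only the distinct values and splits whole runs by cumulative count against N//2, instead of A's sort of the full list with a per-element list.index scan and per-position half test.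
import Mathlib
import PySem

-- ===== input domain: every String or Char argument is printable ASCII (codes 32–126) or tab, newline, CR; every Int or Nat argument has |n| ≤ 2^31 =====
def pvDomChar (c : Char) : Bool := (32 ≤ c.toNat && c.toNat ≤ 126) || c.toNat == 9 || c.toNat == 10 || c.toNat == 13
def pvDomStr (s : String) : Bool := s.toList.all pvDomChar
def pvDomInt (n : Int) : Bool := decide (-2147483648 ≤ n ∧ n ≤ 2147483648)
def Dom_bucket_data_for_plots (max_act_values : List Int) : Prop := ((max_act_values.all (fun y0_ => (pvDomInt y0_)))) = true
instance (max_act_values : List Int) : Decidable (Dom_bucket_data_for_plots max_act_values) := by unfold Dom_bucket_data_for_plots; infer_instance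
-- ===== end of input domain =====

-- B uses a run-length representation — one pass records (first_index, count) per distinct value,
-- sorts only the distinct values and splits whole runs by cumulative count against N//2 —
-- instead of A's sort of the full list with a per-element list.index scan (objective: faster).

-- ===== PORT A =====
-- 'sorted_max_vals[i]' and 'max_act_values.index(value)' never fail (i ∈ range(N), value ∈ list),
-- so pyGetD / (index?).getD 0 are exact here.
def bucket_data_for_plots (max_act_values : List Int) : (List (Int × Int)) × (List (Int × Int)) :=
  let sorted_max_vals := PySem.List.sorted max_act_values (fun v => v) false
  let N : Int := sorted_max_vals.length
  let st := (PySem.List.pyRange 0 N 1).foldl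
    (fun (st : PySem.Dict Int Int × PySem.Dict Int Int) i =>
      let value := PySem.List.pyGetD sorted_max_vals i 0
      let index : Int := (((PySem.List.index? max_act_values value).getD 0 : Nat) : Int)
      if i < PySem.Int.floordiv N 2 then (st.1, st.2.insert index value)
      else (st.1.insert index value, st.2))
    (PySem.Dict.empty, PySem.Dict.empty)
  (st.1.items, st.2.items)

-- ===== PORT B =====
-- 'info[v]' in the first loop is read only under 'v in info', so getD (0, 0) is exact there.
def pvInfo (max_act_values : List Int) : PySem.Dict Int (Int × Int) :=
  (PySem.List.enumerate max_act_values 0).foldl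
    (fun d p =>
      if d.contains p.2 then d.insert p.2 ((d.getD p.2 (0, 0)).1, (d.getD p.2 (0, 0)).2 + 1)
      else d.insert p.2 (p.1, 1))
    PySem.Dict.empty

def bucket_data_for_plots_alt (max_act_values : List Int) : (List (Int × Int)) × (List (Int × Int)) :=
  let info := pvInfo max_act_values
  let h : Int := PySem.Int.floordiv (max_act_values.length : Int) 2
  let st := (PySem.List.sorted info.keys (fun v => v) false).foldl
    (fun (st : PySem.Dict Int Int × PySem.Dict Int Int × Int) v =>
      let fc := info.getD v (0, 0)
      (if st.2.2 + fc.2 > h then st.1.insert fc.1 v else st.1,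
       if st.2.2 < h then st.2.1.insert fc.1 v else st.2.1,
       st.2.2 + fc.2))
    (PySem.Dict.empty, PySem.Dict.empty, 0)
  (st.1.items, st.2.1.items)

-- ===== PRECONDITION & SPEC =====
def Spec_bucket_data_for_plots (max_act_values : List Int) (out : (List (Int × Int)) × (List (Int × Int))) : Prop := out = bucket_data_for_plots_alt max_act_values
instance (max_act_values : List Int) (out : (List (Int × Int)) × (List (Int × Int))) : Decidable (Spec_bucket_data_for_plots max_act_values out) := by unfold Spec_bucket_data_for_plots; infer_instance

-- ===== CLAIM (what is proved, stated in full; the proofs are below) =====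
def Claim_equal_bucket_data_for_plots : Prop := ∀ (max_act_values : List Int), Dom_bucket_data_for_plots max_act_values → Spec_bucket_data_for_plots max_act_values (bucket_data_for_plots max_act_values)

-- ===== LEMMAS AND PROOFS =====

-- A's two-dict loop over range(N) splits at N//2 into a fold over the take and one over the drop
lemma pvSplit (s : List Int) (key : Int → Int) (h : Int) (h0 : 0 ≤ h) (hle : h ≤ (s.length : Int)) :
    (PySem.List.pyRange 0 (s.length : Int)).foldl
      (fun (st : PySem.Dict Int Int × PySem.Dict Int Int) i =>
        if i < h then (st.1, st.2.insert (key (PySem.List.pyGetD s i 0)) (PySem.List.pyGetD s i 0))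
        else (st.1.insert (key (PySem.List.pyGetD s i 0)) (PySem.List.pyGetD s i 0), st.2))
      (PySem.Dict.empty, PySem.Dict.empty)
    = ((s.drop h.toNat).foldl (fun d v => d.insert (key v) v) PySem.Dict.empty,
       (s.take h.toNat).foldl (fun d v => d.insert (key v) v) PySem.Dict.empty) := by
  have hlen : ((s.take h.toNat).length : Int) = h := by
    simp [List.length_take]
    omega
  rw [PySem.List.pyRange_one_append 0 h (s.length : Int) h0 hle, List.foldl_append]
  have e1 : (PySem.List.pyRange 0 h).foldl
      (fun (st : PySem.Dict Int Int × PySem.Dict Int Int) i =>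
        if i < h then (st.1, st.2.insert (key (PySem.List.pyGetD s i 0)) (PySem.List.pyGetD s i 0))
        else (st.1.insert (key (PySem.List.pyGetD s i 0)) (PySem.List.pyGetD s i 0), st.2))
      (PySem.Dict.empty, PySem.Dict.empty)
    = (PySem.Dict.empty, (s.take h.toNat).foldl (fun d v => d.insert (key v) v) PySem.Dict.empty) := by
    have c1 : (PySem.List.pyRange 0 h).foldl
        (fun (st : PySem.Dict Int Int × PySem.Dict Int Int) i =>
          if i < h then (st.1, st.2.insert (key (PySem.List.pyGetD s i 0)) (PySem.List.pyGetD s i 0))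
          else (st.1.insert (key (PySem.List.pyGetD s i 0)) (PySem.List.pyGetD s i 0), st.2))
        (PySem.Dict.empty, PySem.Dict.empty)
      = (PySem.List.pyRange 0 h).foldl
        (fun (st : PySem.Dict Int Int × PySem.Dict Int Int) i =>
          (st.1, st.2.insert (key (PySem.List.pyGetD s i 0)) (PySem.List.pyGetD s i 0)))
        (PySem.Dict.empty, PySem.Dict.empty) := by
      apply PySem.List.foldl_congr_mem
      intro acc i hi
      have := (PySem.List.mem_pyRange_one.mp hi).2
      simp [this]
    rw [c1, PySem.List.foldl_prod_mk (f := fun (a : PySem.Dict Int Int) (_ : Int) => a)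
      (g := fun (b : PySem.Dict Int Int) i =>
        b.insert (key (PySem.List.pyGetD s i 0)) (PySem.List.pyGetD s i 0)),
      PySem.List.foldl_ignore]
    have c2 : (PySem.List.pyRange 0 h).foldl
        (fun (b : PySem.Dict Int Int) i =>
          b.insert (key (PySem.List.pyGetD s i 0)) (PySem.List.pyGetD s i 0)) PySem.Dict.empty
      = (PySem.List.pyRange 0 ((s.take h.toNat).length : Int)).foldl
        (fun (b : PySem.Dict Int Int) i =>
          b.insert (key (PySem.List.pyGetD (s.take h.toNat) i 0)) (PySem.List.pyGetD (s.take h.toNat) i 0))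
        PySem.Dict.empty := by
      rw [hlen]
      apply PySem.List.foldl_congr_mem
      intro acc i hi
      have hi' := PySem.List.mem_pyRange_one.mp hi
      have hiN : i < (s.length : Int) := by omega
      rw [PySem.List.pyGetD_eq_getElem s 0 hi'.1 hiN,
        PySem.List.pyGetD_eq_getElem (s.take h.toNat) 0 hi'.1 (by rw [hlen]; exact hi'.2),
        List.getElem_take]
    rw [c2, PySem.List.foldl_pyRange_zero_pyGetD' (s.take h.toNat) 0
      (fun (d : PySem.Dict Int Int) v => d.insert (key v) v) PySem.Dict.empty]
  rw [e1]
  have c3 : (PySem.List.pyRange h (s.length : Int)).foldl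
      (fun (st : PySem.Dict Int Int × PySem.Dict Int Int) i =>
        if i < h then (st.1, st.2.insert (key (PySem.List.pyGetD s i 0)) (PySem.List.pyGetD s i 0))
        else (st.1.insert (key (PySem.List.pyGetD s i 0)) (PySem.List.pyGetD s i 0), st.2))
      (PySem.Dict.empty, (s.take h.toNat).foldl (fun d v => d.insert (key v) v) PySem.Dict.empty)
    = (PySem.List.pyRange h (s.length : Int)).foldl
      (fun (st : PySem.Dict Int Int × PySem.Dict Int Int) i =>
        (st.1.insert (key (PySem.List.pyGetD s i 0)) (PySem.List.pyGetD s i 0), st.2))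
      (PySem.Dict.empty, (s.take h.toNat).foldl (fun d v => d.insert (key v) v) PySem.Dict.empty) := by
    apply PySem.List.foldl_congr_mem
    intro acc i hi
    have := (PySem.List.mem_pyRange_one.mp hi).1
    have hni : ¬ i < h := by omega
    simp [hni]
  rw [c3, PySem.List.foldl_prod_mk
    (f := fun (a : PySem.Dict Int Int) i =>
      a.insert (key (PySem.List.pyGetD s i 0)) (PySem.List.pyGetD s i 0))
    (g := fun (b : PySem.Dict Int Int) (_ : Int) => b),
    PySem.List.foldl_ignore,
    PySem.List.foldl_pyRange_pyGetD' s 0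
      (fun (d : PySem.Dict Int Int) v => d.insert (key v) v) PySem.Dict.empty h0]

-- B's first loop always stores under key p.2 (both branches are an insert at p.2)
lemma pvStep_eq (d : PySem.Dict Int (Int × Int)) (p : Int × Int) :
    (if d.contains p.2 then d.insert p.2 ((d.getD p.2 (0, 0)).1, (d.getD p.2 (0, 0)).2 + 1)
     else d.insert p.2 (p.1, 1))
    = d.insert p.2 (if d.contains p.2 then ((d.getD p.2 (0, 0)).1, (d.getD p.2 (0, 0)).2 + 1)
                    else (p.1, 1)) := by
  by_cases hc : d.contains p.2 = true <;> simp [hc]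

-- counting loop, key already present: first index kept, count incremented by occurrences
lemma pvInfoFold_contains (v : Int) : ∀ (l : List Int) (s : Int) (d : PySem.Dict Int (Int × Int)),
    d.contains v = true →
    ((PySem.List.enumerate l s).foldl
      (fun d p =>
        d.insert p.2 (if d.contains p.2 then ((d.getD p.2 (0, 0)).1, (d.getD p.2 (0, 0)).2 + 1)
        else (p.1, 1))) d).getD v (0, 0)
    = ((d.getD v (0, 0)).1, (d.getD v (0, 0)).2 + (l.count v : Int)) := by
  intro l
  induction l with
  | nil => intro s d _; simp [PySem.List.enumerate_nil]
  | cons x l ih =>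
    intro s d hd
    rw [PySem.List.enumerate_cons]
    simp only [List.foldl_cons]
    by_cases hx : x = v
    · subst hx
      have hc : (d.insert x (if d.contains x then ((d.getD x (0, 0)).1, (d.getD x (0, 0)).2 + 1)
          else ((s, x).1, 1))).contains x = true := PySem.Dict.contains_insert_self d x _
      rw [ih _ _ hc, PySem.Dict.getD_insert_self]
      simp only [hd, if_true, List.count_cons_self, Prod.mk.injEq]
      refine ⟨trivial, by push_cast; ring⟩
    · have hgd : (d.insert x (if d.contains x then ((d.getD x (0, 0)).1, (d.getD x (0, 0)).2 + 1)
          else ((s, x).1, 1))).getD v (0, 0) = d.getD v (0, 0) :=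
        PySem.Dict.getD_insert_of_ne _ _ _ (Ne.symm hx)
      have hc : (d.insert x (if d.contains x then ((d.getD x (0, 0)).1, (d.getD x (0, 0)).2 + 1)
          else ((s, x).1, 1))).contains v = true := by
        rw [PySem.Dict.contains_insert]; simp [hd]
      rw [ih _ _ hc, hgd, List.count_cons_of_ne hx]

-- counting loop, fresh key: stores (start + first position, number of occurrences)
lemma pvInfoFold_fresh (v : Int) : ∀ (l : List Int) (s : Int) (d : PySem.Dict Int (Int × Int)) (k : Nat),
    d.contains v = false → PySem.List.index? l v = some k →
    ((PySem.List.enumerate l s).foldl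
      (fun d p =>
        d.insert p.2 (if d.contains p.2 then ((d.getD p.2 (0, 0)).1, (d.getD p.2 (0, 0)).2 + 1)
        else (p.1, 1))) d).getD v (0, 0)
    = (s + (k : Int), (l.count v : Int)) := by
  intro l
  induction l with
  | nil => intro s d k _ hk; simp [PySem.List.index?] at hk
  | cons x l ih =>
    intro s d k hd hk
    rw [PySem.List.enumerate_cons]
    simp only [List.foldl_cons]
    by_cases hx : x = v
    · subst hx
      rw [PySem.List.index?_cons_self] at hk
      injection hk with hk0
      subst hk0
      have hc : (d.insert x (if d.contains x then ((d.getD x (0, 0)).1, (d.getD x (0, 0)).2 + 1)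
          else ((s, x).1, 1))).contains x = true := PySem.Dict.contains_insert_self d x _
      rw [pvInfoFold_contains x l _ _ hc, PySem.Dict.getD_insert_self]
      simp only [hd, Bool.false_eq_true, if_false, List.count_cons_self, Prod.mk.injEq]
      refine ⟨by push_cast; ring, by push_cast; ring⟩
    · rw [PySem.List.index?_cons_of_ne l hx] at hk
      rcases Option.map_eq_some_iff.mp hk with ⟨k', hk', rfl⟩
      have hc : (d.insert x (if d.contains x then ((d.getD x (0, 0)).1, (d.getD x (0, 0)).2 + 1)
          else ((s, x).1, 1))).contains v = false := by
        rw [PySem.Dict.contains_insert, hd]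
        simpa using fun e : v = x => hx e.symm
      rw [ih _ _ _ hc hk', List.count_cons_of_ne hx, Prod.mk.injEq]
      refine ⟨by push_cast; ring, rfl⟩

lemma pvInfo_getD (xs : List Int) (v : Int) (hv : v ∈ xs) :
    (pvInfo xs).getD v (0, 0)
    = ((((PySem.List.index? xs v).getD 0 : Nat) : Int), (xs.count v : Int)) := by
  rcases Option.isSome_iff_exists.mp ((PySem.List.index?_isSome_iff xs v).mpr hv) with ⟨k, hk⟩
  unfold pvInfo
  rw [PySem.List.foldl_congr_mem (g := fun (d : PySem.Dict Int (Int × Int)) (p : Int × Int) =>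
      d.insert p.2 (if d.contains p.2 then ((d.getD p.2 (0, 0)).1, (d.getD p.2 (0, 0)).2 + 1)
        else (p.1, 1)))
    (h := fun acc p _ => pvStep_eq acc p)]
  rw [pvInfoFold_fresh v xs 0 PySem.Dict.empty k (by simp) hk, hk]
  simp

lemma pvInfo_keys (xs : List Int) : (pvInfo xs).keys = PySem.Set.ofList xs := by
  unfold pvInfo
  rw [PySem.List.foldl_congr_mem (g := fun (d : PySem.Dict Int (Int × Int)) (p : Int × Int) =>
      d.insert p.2 (if d.contains p.2 then ((d.getD p.2 (0, 0)).1, (d.getD p.2 (0, 0)).2 + 1)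
        else (p.1, 1)))
    (h := fun acc p _ => pvStep_eq acc p)]
  rw [PySem.Dict.keys_foldl_insert_key (key := fun (p : Int × Int) => p.2)
    (f := fun (d : PySem.Dict Int (Int × Int)) (p : Int × Int) =>
      if d.contains p.2 then ((d.getD p.2 (0, 0)).1, (d.getD p.2 (0, 0)).2 + 1) else (p.1, 1))]
  rw [PySem.List.map_snd_enumerate]
  simp [PySem.Set.update, PySem.Set.ofList_eq_foldl, PySem.Dict.keys_empty]

-- folding repeated inserts of the same (key, value) is one insert
lemma pvRepFold (F : Int → Int) (v : Int) : ∀ (n : Nat) (d : PySem.Dict Int Int), 0 < n →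
    (List.replicate n v).foldl (fun d w => d.insert (F w) w) d = d.insert (F v) v := by
  intro n
  induction n with
  | zero => intro d h; omega
  | succ m ih =>
    intro d _
    rw [List.replicate_succ, List.foldl_cons]
    rcases Nat.eq_zero_or_pos m with hm | hm
    · subst hm; simp
    · rw [ih _ hm, PySem.Dict.insert_insert_self]

-- count of a run-length expansion
lemma pvCountFlat (cnt : Int → Nat) (a : Int) : ∀ (rs : List Int), rs.Nodup →
    (rs.flatMap (fun v => List.replicate (cnt v) v)).count a
    = if a ∈ rs then cnt a else 0 := by
  intro rs
  induction rs with
  | nil => intro _; simp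
  | cons v t ih =>
    intro hnd
    rcases List.nodup_cons.mp hnd with ⟨hvt, hnd'⟩
    rw [List.flatMap_cons, List.count_append, List.count_replicate, ih hnd']
    by_cases hav : a = v
    · subst hav
      simp [hvt]
    · have hvn : ¬ v = a := fun e => hav e.symm
      by_cases hat : a ∈ t <;> simp [hat, hav, hvn]

-- a run-length expansion of a strictly increasing value list is sorted
lemma pvPairwiseFlat (cnt : Int → Nat) : ∀ (rs : List Int), rs.Pairwise (· < ·) →
    (rs.flatMap (fun v => List.replicate (cnt v) v)).Pairwise (· ≤ ·) := by
  intro rs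
  induction rs with
  | nil => intro _; simp
  | cons v t ih =>
    intro hp
    rcases List.pairwise_cons.mp hp with ⟨hvt, hp'⟩
    rw [List.flatMap_cons]
    rw [List.pairwise_append]
    refine ⟨?_, ih hp', ?_⟩
    · rw [List.pairwise_replicate]
      right; exact le_refl v
    · intro x hx y hy
      rcases List.eq_of_mem_replicate hx with rfl
      rcases List.mem_flatMap.mp hy with ⟨w, hw, hyw⟩
      rcases List.eq_of_mem_replicate hyw with rfl
      exact le_of_lt (hvt _ hw)

-- B's cumulative-count loop over the runs = one fold over the take and one over the drop
lemma pvLoop (F : Int → Int) (cnt : Int → Nat) (h : Int) :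
    ∀ (rs : List Int), (∀ v ∈ rs, 0 < cnt v) → ∀ (d1 d2 : PySem.Dict Int Int) (seen : Int),
    rs.foldl
      (fun (st : PySem.Dict Int Int × PySem.Dict Int Int × Int) v =>
        (if st.2.2 + ((cnt v : Nat) : Int) > h then st.1.insert (F v) v else st.1,
         if st.2.2 < h then st.2.1.insert (F v) v else st.2.1,
         st.2.2 + ((cnt v : Nat) : Int))) (d1, d2, seen)
    = (((rs.flatMap (fun v => List.replicate (cnt v) v)).drop (h - seen).toNat).foldl
         (fun d w => d.insert (F w) w) d1,
       ((rs.flatMap (fun v => List.replicate (cnt v) v)).take (h - seen).toNat).foldl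
         (fun d w => d.insert (F w) w) d2,
       seen + ((rs.flatMap (fun v => List.replicate (cnt v) v)).length : Int)) := by
  intro rs
  induction rs with
  | nil => intro _ d1 d2 seen; simp
  | cons v t ih =>
    intro hpos d1 d2 seen
    have hc : 0 < cnt v := hpos v (List.mem_cons_self)
    rw [List.foldl_cons, List.flatMap_cons,
      ih (fun w hw => hpos w (List.mem_cons_of_mem v hw))]
    have hlen : ∀ (l : List Int), ((List.replicate (cnt v) v ++ l).length : Int)
        = (cnt v : Int) + (l.length : Int) := by
      intro l; simp
    rw [List.drop_append, List.take_append, List.foldl_append, List.foldl_append, hlen]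
    have e1 : (List.drop ((h - (seen + (cnt v : Int))).toNat) (List.flatMap (fun v => List.replicate (cnt v) v) t)).foldl
          (fun d w => d.insert (F w) w)
          (if seen + ((cnt v : Nat) : Int) > h then d1.insert (F v) v else d1)
        = (List.drop ((h - seen).toNat - (List.replicate (cnt v) v).length) (List.flatMap (fun v => List.replicate (cnt v) v) t)).foldl
          (fun d w => d.insert (F w) w)
          ((List.drop (h - seen).toNat (List.replicate (cnt v) v)).foldl (fun d w => d.insert (F w) w) d1) := by
      rw [List.drop_replicate]
      simp only [List.length_replicate]
      by_cases hbig : seen + (cnt v : Int) > h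
      · have h2 : (h - (seen + (cnt v : Int))).toNat = 0 := by omega
        have h3 : (h - seen).toNat - cnt v = 0 := by omega
        rw [if_pos hbig, h2, h3, pvRepFold F v (cnt v - (h - seen).toNat) _ (by omega)]
      · have h2 : (h - (seen + (cnt v : Int))).toNat = (h - seen).toNat - cnt v := by omega
        have h3 : cnt v - (h - seen).toNat = 0 := by omega
        rw [if_neg hbig, h2, h3]
        simp
    have e2 : (List.take ((h - (seen + (cnt v : Int))).toNat) (List.flatMap (fun v => List.replicate (cnt v) v) t)).foldl
          (fun d w => d.insert (F w) w)
          (if seen < h then d2.insert (F v) v else d2)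
        = (List.take ((h - seen).toNat - (List.replicate (cnt v) v).length) (List.flatMap (fun v => List.replicate (cnt v) v) t)).foldl
          (fun d w => d.insert (F w) w)
          ((List.take (h - seen).toNat (List.replicate (cnt v) v)).foldl (fun d w => d.insert (F w) w) d2) := by
      rw [List.take_replicate]
      simp only [List.length_replicate]
      by_cases hsm : seen < h
      · have h2 : (h - (seen + (cnt v : Int))).toNat = (h - seen).toNat - cnt v := by omega
        rw [if_pos hsm, h2, pvRepFold F v (min (h - seen).toNat (cnt v)) _ (by omega)]
      · have h2 : (h - (seen + (cnt v : Int))).toNat = 0 := by omega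
        have h3 : (h - seen).toNat = 0 := by omega
        rw [if_neg hsm, h2, h3]
        simp
    rw [e1, e2, add_assoc]

-- ===== VERDICT (by name: the statement is the Claim_ definition above) =====
theorem bucket_data_for_plots_spec : Claim_equal_bucket_data_for_plots := by
  intro xs _
  show bucket_data_for_plots xs = bucket_data_for_plots_alt xs
  simp only [bucket_data_for_plots, bucket_data_for_plots_alt]
  rw [pvInfo_keys xs]
  set s := PySem.List.sorted xs (fun v => v) false with hs
  set rs := PySem.List.sorted (PySem.Set.ofList xs) (fun v => v) false with hrs
  have hlen : ((s.length : Nat) : Int) = (xs.length : Int) := by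
    rw [hs, PySem.List.length_sorted]
  have hmem : ∀ v ∈ rs, v ∈ xs := by
    intro v hv
    have := (PySem.List.mem_sorted (PySem.Set.ofList xs) (fun v => v) false v).mp hv
    exact (PySem.Set.mem_ofList _ _).mp this
  -- rewrite B's loop body: the stored (first, count) pair is (xs.index(v), xs.count(v))
  have hcongr : (rs.foldl
      (fun (st : PySem.Dict Int Int × PySem.Dict Int Int × Int) v =>
        let fc := (pvInfo xs).getD v (0, 0)
        (if st.2.2 + fc.2 > PySem.Int.floordiv (xs.length : Int) 2 then st.1.insert fc.1 v else st.1,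
         if st.2.2 < PySem.Int.floordiv (xs.length : Int) 2 then st.2.1.insert fc.1 v else st.2.1,
         st.2.2 + fc.2))
      (PySem.Dict.empty, PySem.Dict.empty, 0))
    = (rs.foldl
      (fun (st : PySem.Dict Int Int × PySem.Dict Int Int × Int) v =>
        (if st.2.2 + (((fun w => xs.count w) v : Nat) : Int) > PySem.Int.floordiv (xs.length : Int) 2 then
           st.1.insert ((fun w => (((PySem.List.index? xs w).getD 0 : Nat) : Int)) v) v else st.1,
         if st.2.2 < PySem.Int.floordiv (xs.length : Int) 2 then
           st.2.1.insert ((fun w => (((PySem.List.index? xs w).getD 0 : Nat) : Int)) v) v else st.2.1,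
         st.2.2 + (((fun w => xs.count w) v : Nat) : Int)))
      (PySem.Dict.empty, PySem.Dict.empty, 0)) := by
    apply PySem.List.foldl_congr_mem
    intro acc v hv
    rw [pvInfo_getD xs v (hmem v hv)]
  rw [hcongr, pvLoop (fun w => (((PySem.List.index? xs w).getD 0 : Nat) : Int))
    (fun w => xs.count w) (PySem.Int.floordiv (xs.length : Int) 2) rs
    (fun v hv => List.count_pos_iff.mpr (hmem v hv)) PySem.Dict.empty PySem.Dict.empty 0]
  -- the run-length expansion of the sorted distinct values IS the sorted list
  have hSperm : (rs.flatMap (fun v => List.replicate (xs.count v) v)).Perm s := by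
    refine List.Perm.trans ?_ (PySem.List.sorted_perm xs (fun v => v) false).symm
    refine (List.perm_iff_count).mpr ?_
    intro a
    have hnd : rs.Nodup :=
      (PySem.List.sorted_perm (PySem.Set.ofList xs) (fun v => v) false).nodup_iff.mpr
        (PySem.Set.nodup_ofList xs)
    rw [pvCountFlat (fun w => xs.count w) a rs hnd]
    by_cases ha : a ∈ rs
    · simp [ha]
    · have : a ∉ xs := fun hx => ha ((PySem.List.mem_sorted _ _ _ a).mpr ((PySem.Set.mem_ofList _ _).mpr hx))
      simp [ha, List.count_eq_zero.mpr this]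
  have hrslt : rs.Pairwise (· < ·) := by
    have h1 : rs.Pairwise (· ≤ ·) := by
      have := PySem.List.sorted_pairwise (PySem.Set.ofList xs) (fun v => v)
      simpa using this
    have h2 : rs.Pairwise (· ≠ ·) :=
      (PySem.List.sorted_perm (PySem.Set.ofList xs) (fun v => v) false).nodup_iff.mpr
        (PySem.Set.nodup_ofList xs)
    exact (h1.and h2).imp (fun hab => lt_of_le_of_ne hab.1 hab.2)
  have hS : rs.flatMap (fun v => List.replicate (xs.count v) v) = s := by
    refine PySem.List.eq_of_perm_of_pairwise_le_of_injective (fun v => v)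
      (fun a b e => e) hSperm ?_ ?_
    · exact pvPairwiseFlat (fun w => xs.count w) rs hrslt
    · have := PySem.List.sorted_pairwise xs (fun v => v)
      simpa using this
  rw [hS]
  have h0 : 0 ≤ PySem.Int.floordiv (xs.length : Int) 2 := by
    rw [PySem.Int.floordiv_eq_ediv_of_pos (by norm_num)]; omega
  have hle : PySem.Int.floordiv (xs.length : Int) 2 ≤ ((s.length : Nat) : Int) := by
    rw [hlen, PySem.Int.floordiv_eq_ediv_of_pos (by norm_num)]; omega
  have hsplit := pvSplit s (fun w => (((PySem.List.index? xs w).getD 0 : Nat) : Int))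
    (PySem.Int.floordiv (xs.length : Int) 2) h0 hle
  rw [hlen] at hsplit
  beta_reduce at hsplit
  rw [hlen, hsplit, sub_zero]
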